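-- pv_equiv track=rewrite | github.com/ed-asriyan/Python-projects | Visual sort/sortMethods.py | circle_sort_backend
-- ===== SOURCE A (Python) =====
-- def circle_sort_backend(A, L, R):
-- 		n = R-L
-- 		if n < 2:
-- 				return 0
-- 		swaps = 0
-- 		m = n//2
-- 		for i in range(m):
-- 				if A[R-(i+1)] < A[L+i]:
-- 						(A[R-(i+1)], A[L+i],) = (A[L+i], A[R-(i+1)],)
-- 						swaps += 1
-- 		if (n & 1) and (A[L+m] < A[L+m-1]):
-- 				(A[L+m-1], A[L+m],) = (A[L+m], A[L+m-1],)
-- 				swaps += 1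
-- 		return swaps + circle_sort_backend(A, L, L+m) + circle_sort_backend(A, L+m, R)
-- ===== SOURCE B (Python) =====
-- def circle_sort_backend(A, L, R):
--     swaps = 0
--     stack = [(L, R)]
--     while stack:
--         L, R = stack.pop()
--         n = R - L
--         if n < 2:
--             continue
--         m = n // 2
--         for i in range(m):
--             if A[R-(i+1)] < A[L+i]:
--                 (A[R-(i+1)], A[L+i],) = (A[L+i], A[R-(i+1)],)
--                 swaps += 1
--         if (n & 1) and (A[L+m] < A[L+m-1]):
--             (A[L+m-1], A[L+m],) = (A[L+m], A[L+m-1],)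
--             swaps += 1
--         stack.append((L+m, R))
--         stack.append((L, L+m))
--     return swaps
-- ===== Notes on version B (the rewrite author's own statement) =====
-- stated objective: alternative
-- what changed: The recursive range-splitting is replaced by an iterative loop over an explicit stack of (L,R) subranges with one running swap counter, removing recursion entirely.
import Mathlib
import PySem

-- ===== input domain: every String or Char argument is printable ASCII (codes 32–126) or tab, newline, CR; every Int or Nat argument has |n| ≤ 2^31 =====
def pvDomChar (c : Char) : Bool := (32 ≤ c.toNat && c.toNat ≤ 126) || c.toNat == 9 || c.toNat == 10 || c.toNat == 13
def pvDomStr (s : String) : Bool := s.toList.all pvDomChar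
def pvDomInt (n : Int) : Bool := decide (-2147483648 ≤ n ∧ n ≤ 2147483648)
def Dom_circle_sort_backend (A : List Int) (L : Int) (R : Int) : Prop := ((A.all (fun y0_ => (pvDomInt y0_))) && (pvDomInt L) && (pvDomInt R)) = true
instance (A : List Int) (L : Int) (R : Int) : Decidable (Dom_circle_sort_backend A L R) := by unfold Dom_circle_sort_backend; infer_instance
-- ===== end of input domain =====

-- B replaces A's recursion by an iterative loop over an explicit stack of (L,R) subranges
-- (same per-range pairing body); both mutate the Python list A identically in place — the
-- equivalence proved here is about the returned swap count.

-- ===== PORT A =====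
-- shared per-range body: the pairing loop over range(m) plus the odd-length middle swap;
-- it is the identical text in Source A and Source B, so both ports cite this one transliteration.
-- state = (current list, swaps added by this range's body)
def csBody (xs : List Int) (L R n m : Int) : List Int × Int :=
  let p := (PySem.List.pyRange 0 m 1).foldl
    (fun (st : List Int × Int) i =>
      if PySem.List.pyGetD st.1 (R - (i+1)) 0 < PySem.List.pyGetD st.1 (L+i) 0 then
        ((PySem.List.pySetD (PySem.List.pySetD st.1 (R-(i+1)) (PySem.List.pyGetD st.1 (L+i) 0))
            (L+i) (PySem.List.pyGetD st.1 (R-(i+1)) 0)), st.2 + 1)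
      else st) (xs, 0)
  if PySem.Int.mod n 2 = 1 ∧ PySem.List.pyGetD p.1 (L+m) 0 < PySem.List.pyGetD p.1 (L+m-1) 0 then
    ((PySem.List.pySetD (PySem.List.pySetD p.1 (L+m-1) (PySem.List.pyGetD p.1 (L+m) 0))
        (L+m) (PySem.List.pyGetD p.1 (L+m-1) 0)), p.2 + 1)
  else p

-- A's recursion, threading the mutated list: returns (final list, swap count).
-- The Nat fuel is only a totality guard (each recursive call shrinks R-L, so fuel
-- (R-L).toNat always suffices); it changes nothing about the computed value.
def csGoF : Nat → List Int → Int → Int → List Int × Int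
  | 0, xs, _, _ => (xs, 0)
  | fuel+1, xs, L, R =>
    let n := R - L
    if n < 2 then (xs, 0)
    else
      let m := PySem.Int.floordiv n 2
      let p := csBody xs L R n m
      let q := csGoF fuel p.1 L (L+m)
      let r := csGoF fuel q.1 (L+m) R
      (r.1, p.2 + q.2 + r.2)

def circle_sort_backend (A : List Int) (L : Int) (R : Int) : Int :=
  (csGoF (R - L).toNat A L R).2

-- ===== PORT B =====
-- Source B's while loop: pop a range, run the body, push the two halves (left on top).
-- The Nat fuel bounds the number of loop iterations (totality guard only: a range of
-- size n is popped at most 2n+1 times in total, so the fuel below always suffices).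
def csLoopF : Nat → List (Int × Int) → List Int → Int → Int
  | 0, _, _, swaps => swaps
  | _+1, [], _, swaps => swaps
  | fuel+1, q :: rest, xs, swaps =>
    let L := q.1
    let R := q.2
    let n := R - L
    if n < 2 then csLoopF fuel rest xs swaps
    else
      let m := PySem.Int.floordiv n 2
      let p := csBody xs L R n m
      csLoopF fuel ((L, L+m) :: (L+m, R) :: rest) p.1 (swaps + p.2)

def circle_sort_backend_alt (A : List Int) (L : Int) (R : Int) : Int :=
  csLoopF (2 * (R - L).toNat + 1) [(L, R)] A 0

-- ===== PRECONDITION & SPEC =====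
-- Pre_ excludes exactly the inputs on which Python A raises IndexError: when R-L ≥ 2 the
-- call touches every position L..R-1, so A returns iff -len(A) ≤ L and R ≤ len(A)
-- (negative indices wrap from the end; both programs behave identically there).
def Pre_circle_sort_backend (A : List Int) (L : Int) (R : Int) : Prop :=
  R - L < 2 ∨ (-(A.length : Int) ≤ L ∧ R ≤ (A.length : Int))
instance (A : List Int) (L : Int) (R : Int) : Decidable (Pre_circle_sort_backend A L R) := by
  unfold Pre_circle_sort_backend; infer_instance

def pvWitness_circle_sort_backend : List Int × Int × Int := ([3, 1, 2, 0], 0, 4)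

def Spec_circle_sort_backend (A : List Int) (L : Int) (R : Int) (out : Int) : Prop := out = circle_sort_backend_alt A L R
instance (A : List Int) (L : Int) (R : Int) (out : Int) : Decidable (Spec_circle_sort_backend A L R out) := by unfold Spec_circle_sort_backend; infer_instance

-- ===== CLAIM (what is proved, stated in full; the proofs are below) =====
def Claim_equal_circle_sort_backend : Prop := ∀ (A : List Int) (L : Int) (R : Int), Dom_circle_sort_backend A L R → Pre_circle_sort_backend A L R → Spec_circle_sort_backend A L R (circle_sort_backend A L R)

-- ===== LEMMAS AND PROOFS =====

theorem csDecL (L R : Int) (h : ¬ R - L < 2) :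
    (L + PySem.Int.floordiv (R - L) 2 - L).toNat < (R - L).toNat := by
  rw [PySem.Int.floordiv_eq_ediv_of_pos (by omega : (0:Int) < 2)]; omega

theorem csDecR (L R : Int) (h : ¬ R - L < 2) :
    (R - (L + PySem.Int.floordiv (R - L) 2)).toNat < (R - L).toNat := by
  rw [PySem.Int.floordiv_eq_ediv_of_pos (by omega : (0:Int) < 2)]; omega

-- proof-side: the exact number of loop iterations (= recursion-tree nodes) a range costs
def rangeT (L R : Int) : Nat :=
  if h : R - L < 2 then 1
  else 1 + rangeT L (L + PySem.Int.floordiv (R - L) 2)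
         + rangeT (L + PySem.Int.floordiv (R - L) 2) R
termination_by (R - L).toNat
decreasing_by
  · exact csDecL L R h
  · exact csDecR L R h

theorem rangeT_pos (L R : Int) : 1 ≤ rangeT L R := by
  rw [rangeT]; split <;> omega

theorem rangeT_le : ∀ (k : Nat) (L R : Int), (R - L).toNat < k → 1 ≤ R - L →
    rangeT L R ≤ 2 * (R - L).toNat - 1 := by
  intro k
  induction k with
  | zero => intro L R h; omega
  | succ k ih =>
    intro L R hk h1
    rw [rangeT]
    split
    · omega
    · rename_i h
      have hm : PySem.Int.floordiv (R - L) 2 = (R - L) / 2 :=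
        PySem.Int.floordiv_eq_ediv_of_pos (by omega)
      have ha := ih L (L + PySem.Int.floordiv (R - L) 2) (by rw [hm]; omega) (by rw [hm]; omega)
      have hb := ih (L + PySem.Int.floordiv (R - L) 2) R (by rw [hm]; omega) (by rw [hm]; omega)
      rw [hm] at ha hb ⊢
      omega

-- csGoF's value does not depend on the fuel once the fuel covers the range size
theorem csGoF_mono : ∀ (f g : Nat) (xs : List Int) (L R : Int),
    (R - L).toNat ≤ f → (R - L).toNat ≤ g → csGoF f xs L R = csGoF g xs L R := by
  intro f
  induction f with
  | zero =>
    intro g xs L R hf hg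
    have h2 : R - L < 2 := by omega
    cases g with
    | zero => rfl
    | succ g => simp [csGoF, h2]
  | succ f ih =>
    intro g xs L R hf hg
    by_cases h2 : R - L < 2
    · cases g with
      | zero => simp [csGoF, h2]
      | succ g => simp [csGoF, h2]
    · cases g with
      | zero => omega
      | succ g =>
        simp only [csGoF, h2, if_false]
        have hm : PySem.Int.floordiv (R - L) 2 = (R - L) / 2 :=
          PySem.Int.floordiv_eq_ediv_of_pos (by omega)
        set m := PySem.Int.floordiv (R - L) 2 with hmdef
        have hq : csGoF f (csBody xs L R (R - L) m).1 L (L + m)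
                = csGoF g (csBody xs L R (R - L) m).1 L (L + m) := by
          apply ih <;> omega
        rw [hq]
        rw [ih g (csGoF g (csBody xs L R (R - L) m).1 L (L + m)).1 (L + m) R (by omega) (by omega)]

-- one stack step of B consumes exactly rangeT L R fuel and equals one full
-- recursive call of A, then the rest of the stack
theorem csLoopF_cons : ∀ (k : Nat) (L R : Int), (R - L).toNat < k →
    ∀ (f : Nat) (xs : List Int) (rest : List (Int × Int)) (s : Int),
      rangeT L R ≤ f →
      csLoopF f ((L, R) :: rest) xs s
        = csLoopF (f - rangeT L R) rest (csGoF (R - L).toNat xs L R).1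
            (s + (csGoF (R - L).toNat xs L R).2) := by
  intro k
  induction k with
  | zero => intro L R h; omega
  | succ k ih =>
    intro L R hk f xs rest s hf
    have hT1 := rangeT_pos L R
    obtain ⟨f', rfl⟩ : ∃ f', f = f' + 1 := ⟨f - 1, by omega⟩
    by_cases h2 : R - L < 2
    · have hT : rangeT L R = 1 := by rw [rangeT]; simp [h2]
      have hG : csGoF (R - L).toNat xs L R = (xs, 0) := by
        have : (R - L).toNat = 0 ∨ (R - L).toNat = 1 := by omega
        rcases this with h | h <;> rw [h] <;> simp [csGoF, h2]
      simp [csLoopF, h2, hT, hG]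
    · have hm : PySem.Int.floordiv (R - L) 2 = (R - L) / 2 :=
        PySem.Int.floordiv_eq_ediv_of_pos (by omega)
      set m := PySem.Int.floordiv (R - L) 2 with hmdef
      have hT : rangeT L R = 1 + rangeT L (L + m) + rangeT (L + m) R := by
        rw [rangeT]; simp [h2, hm]
      have hTa := rangeT_pos L (L + m)
      have hTb := rangeT_pos (L + m) R
      simp only [csLoopF, h2, if_false]
      set p := csBody xs L R (R - L) m with hpdef
      rw [ih L (L + m) (by omega) f' p.1 _ _ (by omega)]
      rw [ih (L + m) R (by omega) _ _ _ _ (by omega)]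
      -- now reduce the A-side value csGoF (R-L).toNat xs L R the same way
      obtain ⟨c, hc⟩ : ∃ c, (R - L).toNat = c + 1 := ⟨(R - L).toNat - 1, by omega⟩
      have hG : csGoF (R - L).toNat xs L R
          = ((csGoF ((R - (L + m)).toNat)
                (csGoF ((L + m - L).toNat) p.1 L (L + m)).1 (L + m) R).1,
             p.2 + (csGoF ((L + m - L).toNat) p.1 L (L + m)).2
                 + (csGoF ((R - (L + m)).toNat)
                     (csGoF ((L + m - L).toNat) p.1 L (L + m)).1 (L + m) R).2) := by
        rw [hc]
        simp only [csGoF, h2, if_false]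
        rw [csGoF_mono c ((L + m - L).toNat) p.1 L (L + m) (by omega) (by omega)]
        rw [csGoF_mono c ((R - (L + m)).toNat) _ (L + m) R (by omega) (by omega)]
      rw [hG]
      have harith : f' + 1 - rangeT L R
          = f' - rangeT L (L + m) - rangeT (L + m) R := by omega
      rw [harith]
      congr 1
      ring

theorem csLoopF_nil (f : Nat) (xs : List Int) (s : Int) : csLoopF f [] xs s = s := by
  cases f <;> rfl

theorem circle_sort_backend_spec : Claim_equal_circle_sort_backend := by
  intro A L R _ _
  unfold Spec_circle_sort_backend circle_sort_backend circle_sort_backend_alt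
  have hT : rangeT L R ≤ 2 * (R - L).toNat + 1 := by
    by_cases h1 : 1 ≤ R - L
    · have := rangeT_le ((R - L).toNat + 1) L R (by omega) h1
      omega
    · have : rangeT L R = 1 := by rw [rangeT]; simp [show R - L < 2 by omega]
      omega
  rw [csLoopF_cons ((R - L).toNat + 1) L R (by omega) _ A [] 0 hT]
  rw [csLoopF_nil]
  omega
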